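-- pv_equiv track=rewrite | github.com/brandonkeithmarkham/Inventory_Mgmt | src/app_streamlit.py | ref_prefix
-- ===== SOURCE A (Python) =====
-- def ref_prefix(reference: str) -> str:
--     """
--     Extract the alphabetical reference prefix from KiCad's Reference column.
--
--     Examples:
--       "R1"  -> "R"
--       "C10" -> "C"
--       "RV1" -> "RV"
--
--     If KiCad output includes comma groupings ("R1, R2"), I use the first group.
--     """
--     r = (reference or "").strip()
--     if not r:
--         return "X"
--     first = r.split(",")[0].strip()
--     letters = ""
--     for ch in first:
--         if ch.isalpha():
--             letters += ch.upper()
--         else: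
--             break
--     return letters or "X"
-- ===== SOURCE B (Python) =====
-- def ref_prefix(reference: str) -> str:
--     # The comma split and the two strips in A can never cut into an alphabetical
--     # prefix (',' and whitespace are not letters), so only the leading whitespace
--     # matters: lstrip once, count the leading letters, slice and uppercase once.
--     s = (reference or "").lstrip()
--     n = 0
--     while n < len(s) and s[n].isalpha():
--         n += 1
--     return s[:n].upper() or "X"
-- ===== Notes on version B (the rewrite author's own statement) =====
-- stated objective: simpler
-- what changed: B drops A's strip/comma-split/re-strip preprocessing entirely (a comma or trailing whitespace can never intersect an alphabetical prefix): it lstrips once, counts the leading letters with an index loop, then takes one slice and uppercases it once, instead of A's split plus per-character accumulate-and-uppercase loop.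
import Mathlib
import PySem

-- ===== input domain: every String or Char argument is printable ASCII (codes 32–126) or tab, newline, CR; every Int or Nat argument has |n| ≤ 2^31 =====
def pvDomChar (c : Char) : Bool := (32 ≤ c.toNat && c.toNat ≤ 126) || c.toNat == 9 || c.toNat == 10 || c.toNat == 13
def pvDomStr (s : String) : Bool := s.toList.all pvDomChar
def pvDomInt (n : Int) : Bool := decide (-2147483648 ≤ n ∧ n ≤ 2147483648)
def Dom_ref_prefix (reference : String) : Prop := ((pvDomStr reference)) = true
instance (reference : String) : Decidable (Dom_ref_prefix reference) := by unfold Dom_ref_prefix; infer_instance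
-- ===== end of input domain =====

-- B drops A's strip/comma-split preprocessing entirely (a comma or trailing
-- whitespace can never cut into an alphabetical prefix): it lstrips once, counts
-- the leading letters, then slices and uppercases once. Same value everywhere.

-- ===== PORT A =====
-- 'for ch in first: if ch.isalpha(): letters += ch.upper() else: break'
def refLoopA : List Char → List Char → List Char
  | acc, [] => acc
  | acc, c :: rest =>
    if PySem.Chars.isalpha c then refLoopA (acc ++ [PySem.Chars.upperChar c]) rest else acc

def ref_prefix (reference : String) : String :=
  let r := PySem.Chars.strip (if reference == "" then "".toList else reference.toList)
  if r = [] then "X"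
  else
    let first := PySem.Chars.strip ((PySem.Chars.splitOn r [',']).headD [])
    let letters := refLoopA [] first
    if letters = [] then "X" else String.ofList letters

-- ===== PORT B =====
-- 'n = 0; while n < len(s) and s[n].isalpha(): n += 1'
def refAlphaLenB : List Char → Nat
  | [] => 0
  | c :: rest => if PySem.Chars.isalpha c then refAlphaLenB rest + 1 else 0

def ref_prefix_alt (reference : String) : String :=
  let s := PySem.Chars.lstrip (if reference == "" then "".toList else reference.toList)
  let n := refAlphaLenB s
  let pre := PySem.Chars.upper (PySem.Chars.slice s none (some (n : Int)))
  if pre = [] then "X" else String.ofList pre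

-- ===== PRECONDITION & SPEC =====
def Spec_ref_prefix (reference : String) (out : String) : Prop := out = ref_prefix_alt reference
instance (reference : String) (out : String) : Decidable (Spec_ref_prefix reference out) := by unfold Spec_ref_prefix; infer_instance

-- ===== CLAIM (what is proved, stated in full; the proofs are below) =====
def Claim_equal_ref_prefix : Prop := ∀ (reference : String), Dom_ref_prefix reference → Spec_ref_prefix reference (ref_prefix reference)

-- ===== LEMMAS AND PROOFS =====

lemma space_not_alpha (c : Char) (h : PySem.Chars.isspace c = true) : PySem.Chars.isalpha c = false := by
  simp only [PySem.Chars.isspace, PySem.Chars.isalpha, PySem.Chars.isupper, PySem.Chars.islower,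
    Bool.or_eq_true, Bool.and_eq_true, decide_eq_true_eq, Char.le_def, UInt32.le_iff_toNat_le,
    Bool.or_eq_false_iff, Bool.and_eq_false_iff, decide_eq_false_iff_not, not_le] at *
  have hv : c.toNat = c.val.toNat := rfl
  have h1 : ('A'.val.toNat) = 65 := rfl
  have h2 : ('Z'.val.toNat) = 90 := rfl
  have h3 : ('a'.val.toNat) = 97 := rfl
  have h4 : ('z'.val.toNat) = 122 := rfl
  constructor <;> omega

lemma alpha_ne_comma (c : Char) (h : PySem.Chars.isalpha c = true) : (c != ',') = true := by
  revert h
  simp only [PySem.Chars.isalpha, PySem.Chars.isupper, PySem.Chars.islower, Bool.or_eq_true,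
    Bool.and_eq_true, decide_eq_true_eq, bne_iff_ne, ne_eq, Char.le_def, UInt32.le_iff_toNat_le]
  intro h e
  subst e
  have hv : (','.val.toNat) = 44 := rfl
  have h1 : ('A'.val.toNat) = 65 := rfl
  have h2 : ('Z'.val.toNat) = 90 := rfl
  have h3 : ('a'.val.toNat) = 97 := rfl
  have h4 : ('z'.val.toNat) = 122 := rfl
  omega

-- A's per-character loop is the uppercased alphabetical takeWhile.
lemma refLoopA_eq (cs : List Char) : ∀ acc,
    refLoopA acc cs = acc ++ (cs.takeWhile PySem.Chars.isalpha).map PySem.Chars.upperChar := by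
  induction cs with
  | nil => intro acc; simp [refLoopA]
  | cons c rest ih =>
    intro acc
    by_cases h : PySem.Chars.isalpha c
    · simp [refLoopA, h, ih]
    · simp [refLoopA, h]

-- B's counting loop is the length of the alphabetical takeWhile.
lemma refAlphaLenB_eq (cs : List Char) :
    refAlphaLenB cs = (cs.takeWhile PySem.Chars.isalpha).length := by
  induction cs with
  | nil => simp [refAlphaLenB]
  | cons c rest ih =>
    by_cases h : PySem.Chars.isalpha c
    · simp [refAlphaLenB, h, ih]
    · simp [refAlphaLenB, h]

-- right-stripping never touches an alphabetical prefix
lemma takeWhile_alpha_rstrip (z : List Char) :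
    (PySem.Chars.rstrip z).takeWhile PySem.Chars.isalpha = z.takeWhile PySem.Chars.isalpha := by
  unfold PySem.Chars.rstrip
  conv_rhs => rw [show z = (z.reverse.takeWhile PySem.Chars.isspace ++ z.reverse.dropWhile PySem.Chars.isspace).reverse by
    rw [List.takeWhile_append_dropWhile, List.reverse_reverse]]
  rw [List.reverse_append]
  rw [List.takeWhile_append]
  have hw : (z.reverse.takeWhile PySem.Chars.isspace).reverse.takeWhile PySem.Chars.isalpha = [] := by
    cases hx : (z.reverse.takeWhile PySem.Chars.isspace).reverse with
    | nil => simp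
    | cons a t =>
      have ha : a ∈ z.reverse.takeWhile PySem.Chars.isspace := by
        have : a ∈ (z.reverse.takeWhile PySem.Chars.isspace).reverse := by simp [hx]
        simpa using this
      have : PySem.Chars.isalpha a = false :=
        space_not_alpha a (List.mem_takeWhile_imp ha)
      simp [this]
  split_ifs with hlen
  · have : (z.reverse.dropWhile PySem.Chars.isspace).reverse.takeWhile PySem.Chars.isalpha
        = (z.reverse.dropWhile PySem.Chars.isspace).reverse :=
      (List.takeWhile_prefix _).eq_of_length hlen
    rw [hw, this, List.append_nil]
  · rfl

-- the alphabetical takeWhile sees through a takeWhile (· != ',')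
lemma takeWhile_alpha_comma (l : List Char) :
    (l.takeWhile (fun c => c != ',')).takeWhile PySem.Chars.isalpha
      = l.takeWhile PySem.Chars.isalpha := by
  induction l with
  | nil => rfl
  | cons c rest ih =>
    by_cases h : PySem.Chars.isalpha c
    · have hq := alpha_ne_comma c h
      simp [hq, h, ih]
    · by_cases hq : (c != ',') = true
      · simp [hq, h]
      · simp [hq, h]

-- head of splitOn.go once a piece has been banked: the first banked piece survives
lemma go_headD_push (sep : List Char) : ∀ (fuel : Nat) (l cur : List Char)
    (as : List (List Char)) (a : List Char),
    (PySem.Chars.splitOn.go sep fuel l cur (as ++ [a])).headD [] = a := by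
  intro fuel
  induction fuel with
  | zero =>
    intro l cur as a
    simp [PySem.Chars.splitOn.go]
  | succ fuel ih =>
    intro l cur as a
    cases l with
    | nil => simp [PySem.Chars.splitOn.go]
    | cons c rest =>
      rw [PySem.Chars.splitOn.go]
      split_ifs with hp
      · have : (cur.reverse :: (as ++ [a])) = (cur.reverse :: as) ++ [a] := by simp
        rw [this, ih]
      · exact ih rest (c :: cur) as a

-- head of splitOn.go with an empty bank: the chars before the first comma
lemma go_headD (fuel : Nat) : ∀ (l cur : List Char), l.length ≤ fuel →
    (PySem.Chars.splitOn.go [','] fuel l cur []).headD []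
      = cur.reverse ++ l.takeWhile (fun c => c != ',') := by
  induction fuel with
  | zero =>
    intro l cur hl
    have : l = [] := List.length_eq_zero_iff.mp (Nat.le_zero.mp hl)
    subst this
    simp [PySem.Chars.splitOn.go]
  | succ fuel ih =>
    intro l cur hl
    cases l with
    | nil => simp [PySem.Chars.splitOn.go]
    | cons c rest =>
      rw [PySem.Chars.splitOn.go]
      split_ifs with hp
      · have hc : ',' = c := by
          simpa [List.isPrefixOf] using hp
        subst hc
        have := go_headD_push [','] fuel (List.drop 1 (',' :: rest)) [] [] cur.reverse
        simpa [List.takeWhile_cons] using this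
      · have hc : ¬ (c = ',') := by
          intro e; subst e; simp [List.isPrefixOf] at hp
        have hrest : rest.length ≤ fuel := by simpa using hl
        rw [ih rest (c :: cur) hrest]
        have hq : (c != ',') = true := by simpa [bne_iff_ne]
        simp [hq]

lemma splitOn_headD (r : List Char) :
    ((PySem.Chars.splitOn r [',']).headD []) = r.takeWhile (fun c => c != ',') := by
  unfold PySem.Chars.splitOn
  exact go_headD (r.length + 1) r [] (by omega)

lemma dropWhile_head_false {p : Char → Bool} {l l' : List Char} {c : Char}
    (h : l.dropWhile p = c :: l') : p c = false := by
  have := List.head_dropWhile_not p (l := l) (w := by simp [h])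
  simpa [h] using this

-- the key bridge: A's 'first' and B's lstripped string have the same alphabetical prefix
lemma first_alpha_eq (raw : List Char) :
    ((PySem.Chars.strip ((PySem.Chars.splitOn (PySem.Chars.strip raw) [',']).headD [])).takeWhile
        PySem.Chars.isalpha)
      = (PySem.Chars.lstrip raw).takeWhile PySem.Chars.isalpha := by
  set u := PySem.Chars.lstrip raw with hu
  have hstrip : PySem.Chars.strip raw = PySem.Chars.rstrip u := rfl
  rw [hstrip, splitOn_headD]
  set f := (PySem.Chars.rstrip u).takeWhile (fun c => c != ',') with hf
  -- f is a prefix of u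
  have hpref : f <+: u := by
    have h1 : f <+: PySem.Chars.rstrip u := List.takeWhile_prefix _
    have h2 : PySem.Chars.rstrip u <+: u := by
      have := (List.dropWhile_suffix (l := u.reverse) PySem.Chars.isspace).reverse
      simpa [PySem.Chars.rstrip] using this
    exact h1.trans h2
  -- strip f = rstrip f, since f has no leading whitespace
  have hls : PySem.Chars.lstrip f = f := by
    cases hfc : f with
    | nil => simp [PySem.Chars.lstrip]
    | cons a t =>
      have hau : ∃ u', u = a :: u' := by
        rcases hpref with ⟨w, hw⟩
        rw [hfc] at hw
        exact ⟨t ++ w, by simpa using hw.symm⟩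
      rcases hau with ⟨u', hu'⟩
      have hdw : List.dropWhile PySem.Chars.isspace raw = a :: u' := by
        rw [show List.dropWhile PySem.Chars.isspace raw = PySem.Chars.lstrip raw from rfl, ← hu, hu']
      have hna : PySem.Chars.isspace a = false := dropWhile_head_false hdw
      simp [PySem.Chars.lstrip, hna]
  show (PySem.Chars.strip f).takeWhile PySem.Chars.isalpha = _
  unfold PySem.Chars.strip
  rw [hls, takeWhile_alpha_rstrip, hf, takeWhile_alpha_comma, takeWhile_alpha_rstrip]

-- if strip gives [], lstrip already gave []
lemma lstrip_nil_of_strip_nil (raw : List Char) (h : PySem.Chars.strip raw = []) :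
    PySem.Chars.lstrip raw = [] := by
  cases hc : PySem.Chars.lstrip raw with
  | nil => rfl
  | cons a t =>
    exfalso
    have hs : PySem.Chars.rstrip (a :: t) = [] := by
      have : PySem.Chars.strip raw = PySem.Chars.rstrip (PySem.Chars.lstrip raw) := rfl
      rw [this, hc] at h
      exact h
    have hall : ∀ x ∈ (a :: t).reverse, PySem.Chars.isspace x := by
      have : (a :: t).reverse.dropWhile PySem.Chars.isspace = [] := by
        have := congrArg List.reverse hs
        simpa [PySem.Chars.rstrip] using this
      exact fun x hx => List.dropWhile_eq_nil_iff.mp this x hx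
    have ha : PySem.Chars.isspace a := hall a (by simp)
    have hna : PySem.Chars.isspace a = false :=
      dropWhile_head_false (p := PySem.Chars.isspace) (l := raw) (l' := t) (c := a) hc
    rw [hna] at ha
    cases ha

-- ===== VERDICT (by name: the statement is the Claim_ definition above) =====
theorem ref_prefix_spec : Claim_equal_ref_prefix := by
  intro reference _
  unfold Spec_ref_prefix ref_prefix ref_prefix_alt
  set raw := (if reference == "" then "".toList else reference.toList) with hraw
  by_cases hr : PySem.Chars.strip raw = []
  · have hl : PySem.Chars.lstrip raw = [] := lstrip_nil_of_strip_nil raw hr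
    simp [hr, hl, refAlphaLenB, PySem.Chars.upper]
    intro hfalse
    exact absurd (by decide : PySem.List.slice ([] : List Char) none (some 0) = []) hfalse
  · have hletters : refLoopA [] (PySem.Chars.strip ((PySem.Chars.splitOn (PySem.Chars.strip raw) [',']).headD []))
        = ((PySem.Chars.lstrip raw).takeWhile PySem.Chars.isalpha).map PySem.Chars.upperChar := by
      rw [refLoopA_eq, first_alpha_eq]
      simp
    have hpre : PySem.Chars.upper (PySem.Chars.slice (PySem.Chars.lstrip raw) none
          (some ((refAlphaLenB (PySem.Chars.lstrip raw) : Nat) : Int)))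
        = ((PySem.Chars.lstrip raw).takeWhile PySem.Chars.isalpha).map PySem.Chars.upperChar := by
      rw [refAlphaLenB_eq]
      rw [PySem.Chars.slice_eq_listSlice, PySem.List.slice_to_natCast]
      rw [← List.prefix_iff_eq_take.mp (List.takeWhile_prefix _)]
      simp [PySem.Chars.upper]
    simp only [hr]
    rw [hletters, hpre]
    simp
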